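-- pv_equiv track=rewrite | github.com/Rake-5105/HIDS-Identification-of-URL-based-attacks-from-IP-data | data_modules/url_parsing/normalizer.py | _resolve_dot_segments
-- ===== SOURCE A (Python) =====
-- from typing import List, Optional, Set
--
-- def _resolve_dot_segments(path: str) -> str:
--     """Resolve '.' and '..' segments in a URL path (RFC 3986 §5.2.4)."""
--     segments: List[str] = []
--     for seg in path.split("/"):
--         if seg == "..":
--             if segments:
--                 segments.pop()
--         elif seg != ".":
--             segments.append(seg)
--     result = "/".join(segments)
--     if not result.startswith("/"):
--         result = "/" + result
--     return result
-- ===== SOURCE B (Python) =====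
-- def _resolve_dot_segments(path: str) -> str:
--     # Right-to-left single pass with a pending-pop counter instead of a stack with pops.
--     kept = []
--     skip = 0
--     for seg in reversed(path.split("/")):
--         if seg == "..":
--             skip += 1
--         elif seg == ".":
--             pass
--         elif skip > 0:
--             skip -= 1
--         else:
--             kept.append(seg)
--     kept.reverse()
--     result = "/".join(kept)
--     if not result.startswith("/"):
--         result = "/" + result
--     return result
-- ===== Notes on version B (the rewrite author's own statement) =====
-- stated objective: alternative
-- what changed: Replaces the left-to-right stack with pop-if-nonempty by a single right-to-left pass that maintains an integer pending-pop counter and never mutates already-kept segments.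
import Mathlib
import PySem

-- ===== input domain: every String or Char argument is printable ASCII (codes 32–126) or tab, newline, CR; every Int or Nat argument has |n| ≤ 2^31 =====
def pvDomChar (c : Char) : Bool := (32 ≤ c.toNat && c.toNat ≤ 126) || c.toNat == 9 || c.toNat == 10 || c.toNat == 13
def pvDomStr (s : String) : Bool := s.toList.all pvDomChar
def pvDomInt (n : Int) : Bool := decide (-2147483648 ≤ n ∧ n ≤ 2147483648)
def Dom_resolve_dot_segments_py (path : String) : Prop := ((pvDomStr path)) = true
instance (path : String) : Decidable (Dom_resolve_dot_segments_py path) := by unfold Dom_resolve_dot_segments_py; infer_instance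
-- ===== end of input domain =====

-- B changes the algorithm: a single right-to-left pass with a pending-pop counter instead of A's stack with pops (alternative decomposition, same cost).

-- ===== PORT A =====
-- one loop step of A: '..' pops if nonempty, '.' is skipped, anything else is appended
def pvStepA (acc : List String) (seg : String) : List String :=
  if seg = ".." then (if acc ≠ [] then acc.dropLast else acc)
  else if seg = "." then acc
  else acc ++ [seg]

-- joining and leading-slash normalization, as in A's last three lines
def pvFinishA (segments : List String) : String :=
  let result := PySem.Str.join "/" segments
  if ¬ (PySem.Str.startswith result "/" = true) then "/" ++ result else result

def resolve_dot_segments_py (path : String) : String :=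
  pvFinishA (((PySem.Str.split? path "/").getD []).foldl pvStepA [])

-- ===== PORT B =====
-- one right-to-left step of B: '..' raises the pending-pop counter, '.' is ignored,
-- a pending pop consumes a normal segment, otherwise the segment is kept (prepended)
def pvStepB (seg : String) (st : Nat × List String) : Nat × List String :=
  if seg = ".." then (st.1 + 1, st.2)
  else if seg = "." then st
  else if st.1 > 0 then (st.1 - 1, st.2)
  else (st.1, seg :: st.2)

-- joining and leading-slash normalization, as in B's last three lines
def pvFinishB (kept : List String) : String :=
  let result := PySem.Str.join "/" kept
  if ¬ (PySem.Str.startswith result "/" = true) then "/" ++ result else result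

def resolve_dot_segments_py_alt (path : String) : String :=
  pvFinishB ((((PySem.Str.split? path "/").getD []).foldr pvStepB (0, [])).2)

-- ===== PRECONDITION & SPEC =====
def Spec_resolve_dot_segments_py (path : String) (out : String) : Prop := out = resolve_dot_segments_py_alt path
instance (path : String) (out : String) : Decidable (Spec_resolve_dot_segments_py path out) := by unfold Spec_resolve_dot_segments_py; infer_instance

-- ===== CLAIM (what is proved, stated in full; the proofs are below) =====
def Claim_equal_resolve_dot_segments_py : Prop := ∀ (path : String), Dom_resolve_dot_segments_py path → Spec_resolve_dot_segments_py path (resolve_dot_segments_py path)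

-- ===== LEMMAS AND PROOFS =====

-- A's left-to-right fold starting from any accumulator equals: drop the pending pops
-- from the accumulator's end, then append B's kept segments.
theorem pv_fold_eq (segs : List String) : ∀ (acc : List String),
    segs.foldl pvStepA acc =
      acc.take (acc.length - (segs.foldr pvStepB (0, [])).1) ++ (segs.foldr pvStepB (0, [])).2 := by
  induction segs with
  | nil => intro acc; simp
  | cons s rest ih =>
    intro acc
    simp only [List.foldl_cons, List.foldr_cons]
    rw [ih]
    set st := rest.foldr pvStepB (0, []) with hst
    unfold pvStepA pvStepB
    by_cases h2 : s = ".."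
    · rw [if_pos h2, if_pos h2]
      rcases acc.eq_nil_or_concat with h | ⟨ys, y, rfl⟩
      · subst h; simp
      · have hne : ys.concat y ≠ [] := by simp
        rw [if_pos hne]
        simp only [List.concat_eq_append] at hne ⊢
        rw [List.dropLast_concat]
        have hy : (ys ++ [y]).length = ys.length + 1 := by simp
        have hlen : (ys ++ [y]).length - (st.1 + 1) = ys.length - st.1 := by omega
        rw [hlen]
        congr 1
        by_cases hle : st.1 ≤ ys.length
        · rw [List.take_append_of_le_length (by omega)]
        · have h1 : ys.length - st.1 = 0 := by omega
          simp [h1]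
    · rw [if_neg h2, if_neg h2]
      by_cases h3 : s = "."
      · simp [h3]
      · rw [if_neg h3, if_neg h3]
        by_cases hpos : st.1 > 0
        · rw [if_pos hpos]
          have hlen : acc.length + 1 - st.1 = acc.length - (st.1 - 1) := by omega
          rw [List.length_append, List.length_singleton, hlen,
            List.take_append_of_le_length (by omega)]
        · have h0 : st.1 = 0 := by omega
          rw [if_neg hpos]
          simp [h0, List.take_of_length_le (by simp : (acc ++ [s]).length ≤ acc.length + 1)]

theorem resolve_dot_segments_py_eq (path : String) :
    resolve_dot_segments_py path = resolve_dot_segments_py_alt path := by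
  unfold resolve_dot_segments_py resolve_dot_segments_py_alt
  rw [pv_fold_eq ((PySem.Str.split? path "/").getD []) [], List.take_nil, List.nil_append]
  rfl

-- ===== VERDICT (by name: the statement is the Claim_ definition above) =====
theorem resolve_dot_segments_py_spec : Claim_equal_resolve_dot_segments_py := by
  intro path _
  unfold Spec_resolve_dot_segments_py
  exact resolve_dot_segments_py_eq path
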